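-- pv_equiv track=rewrite | github.com/syllog1sm/ccg | ccg/category.py | _strip_brackets
-- ===== SOURCE A (Python) =====
-- def _strip_brackets(cat_str):
--     if not (cat_str.startswith('(') and cat_str.endswith(')')):
--         return cat_str
--     depth = 0
--     for c in cat_str:
--         if c == '(':
--             depth += 1
--         elif c == ')':
--             depth -= 1
--         if depth == 0 and (c == '/' or c == '\\' or c == '^'):
--             return cat_str
--     else:
--         return cat_str[1:-1]
-- ===== SOURCE B (Python) =====
-- def _strip_brackets(cat_str):
--     if not (cat_str.startswith('(') and cat_str.endswith(')')):
--         return cat_str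
--     ops = [i for i, c in enumerate(cat_str) if c in '/\\^']
--     for i in ops:
--         prefix = cat_str[:i]
--         if prefix.count('(') == prefix.count(')'):
--             return cat_str
--     return cat_str[1:-1]
-- ===== Notes on version B (the rewrite author's own statement) =====
-- stated objective: alternative
-- what changed: B keeps no running depth counter: it first collects the indices of all operator characters via enumerate, then for each such index decides top-levelness by comparing the counts of opening and closing brackets in the prefix slice before it; A instead threads a depth accumulator through a single character scan.
import Mathlib
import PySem

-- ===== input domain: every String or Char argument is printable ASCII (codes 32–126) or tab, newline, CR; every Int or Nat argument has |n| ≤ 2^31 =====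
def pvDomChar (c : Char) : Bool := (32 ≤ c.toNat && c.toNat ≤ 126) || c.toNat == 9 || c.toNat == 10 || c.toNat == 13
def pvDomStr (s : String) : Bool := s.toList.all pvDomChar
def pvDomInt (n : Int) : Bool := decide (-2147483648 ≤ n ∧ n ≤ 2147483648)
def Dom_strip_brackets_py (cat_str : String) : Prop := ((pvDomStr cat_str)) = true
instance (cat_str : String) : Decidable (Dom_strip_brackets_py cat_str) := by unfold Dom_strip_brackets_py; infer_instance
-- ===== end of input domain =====

-- B keeps no running depth counter: it collects the operator positions first and then
-- decides each operator index by bracket counts of the prefix slice before it; alternative decomposition, same result.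

-- ===== PORT A =====
-- A's for-loop over the characters carrying the running depth, early return inside the loop
def stripALoop (cat_str : String) : List Char → Int → String
  | [], _ => PySem.Str.slice cat_str (some 1) (some (-1))
  | c :: rest, depth =>
    let depth' : Int := if c = '(' then depth + 1 else if c = ')' then depth - 1 else depth
    if depth' = 0 ∧ (c = '/' ∨ c = '\\' ∨ c = '^') then cat_str
    else stripALoop cat_str rest depth'

def strip_brackets_py (cat_str : String) : String :=
  if ¬(PySem.Str.startswith cat_str "(" ∧ PySem.Str.endswith cat_str ")") then cat_str
  else stripALoop cat_str cat_str.toList 0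

-- ===== PORT B =====
-- B's for-loop over the collected operator indices, each decided by prefix counts
def stripBLoop (cat_str : String) : List Int → String
  | [] => PySem.Str.slice cat_str (some 1) (some (-1))
  | i :: rest =>
    let pre := PySem.Str.slice cat_str none (some i)
    if PySem.Str.count pre "(" = PySem.Str.count pre ")" then cat_str
    else stripBLoop cat_str rest

def strip_brackets_py_alt (cat_str : String) : String :=
  if ¬(PySem.Str.startswith cat_str "(" ∧ PySem.Str.endswith cat_str ")") then cat_str
  else
    -- ops = [i for i, c in enumerate(cat_str) if c in '/\\^']
    let ops := ((PySem.List.enumerate cat_str.toList 0).filter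
        (fun p => p.2 == '/' || p.2 == '\\' || p.2 == '^')).map Prod.fst
    stripBLoop cat_str ops

-- ===== PRECONDITION & SPEC =====
def Spec_strip_brackets_py (cat_str : String) (out : String) : Prop := out = strip_brackets_py_alt cat_str
instance (cat_str : String) (out : String) : Decidable (Spec_strip_brackets_py cat_str out) := by unfold Spec_strip_brackets_py; infer_instance

-- ===== CLAIM (what is proved, stated in full; the proofs are below) =====
def Claim_equal_strip_brackets_py : Prop := ∀ (cat_str : String), Dom_strip_brackets_py cat_str → Spec_strip_brackets_py cat_str (strip_brackets_py cat_str)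

-- ===== LEMMAS AND PROOFS =====

def pvIsOp (c : Char) : Bool := c == '/' || c == '\\' || c == '^'

def pvBal (l : List Char) : Int := (l.count '(' : Int) - (l.count ')' : Int)

-- Boolean shape of A's loop test: "some later char is a top-level operator", depth offset d
def pvHasTop (d : Int) : List Char → Bool
  | [] => false
  | c :: rest =>
    let d' : Int := if c = '(' then d + 1 else if c = ')' then d - 1 else d
    ((d' == 0) && pvIsOp c) || pvHasTop d' rest

theorem pvIsOp_not_paren {c : Char} (h : pvIsOp c = true) : c ≠ '(' ∧ c ≠ ')' := by
  simp only [pvIsOp, Bool.or_eq_true, beq_iff_eq] at h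
  rcases h with (h | h) | h <;> subst h <;> exact ⟨by decide, by decide⟩

theorem pvHasTop_iff (cs : List Char) (d : Int) :
    pvHasTop d cs = true ↔ ∃ k, ∃ _ : k < cs.length, pvIsOp cs[k] ∧ d + pvBal (cs.take k) = 0 := by
  induction cs generalizing d with
  | nil => simp [pvHasTop]
  | cons c rest ih =>
    have hshift : ∀ k, pvBal ((c :: rest).take (k + 1))
        = (if c = '(' then (1:Int) else 0) - (if c = ')' then (1:Int) else 0) + pvBal (rest.take k) := by
      intro k
      simp only [List.take_succ_cons, pvBal, List.count_cons]
      by_cases h1 : c = '(' <;> by_cases h2 : c = ')' <;> simp [h1, h2] <;> omega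
    have hd' : (if c = '(' then d + 1 else if c = ')' then d - 1 else d)
        = d + ((if c = '(' then (1:Int) else 0) - (if c = ')' then (1:Int) else 0)) := by
      by_cases h1 : c = '(' <;> by_cases h2 : c = ')' <;> simp [h1, h2] <;> omega
    constructor
    · intro h
      simp only [pvHasTop, Bool.or_eq_true, Bool.and_eq_true] at h
      rcases h with ⟨hz, hop⟩ | h
      · refine ⟨0, by simp, by simpa using hop, ?_⟩
        have hnp := pvIsOp_not_paren hop
        rw [beq_iff_eq, if_neg hnp.1, if_neg hnp.2] at hz
        simp only [List.take_zero, pvBal, List.count_nil]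
        omega
      · rcases (ih _).mp h with ⟨k, hk, hop, hbal⟩
        refine ⟨k + 1, by simpa using Nat.succ_lt_succ hk, by simpa using hop, ?_⟩
        rw [hshift k]
        rw [hd'] at hbal
        omega
    · rintro ⟨k, hk, hop, hbal⟩
      simp only [pvHasTop, Bool.or_eq_true, Bool.and_eq_true]
      cases k with
      | zero =>
        left
        have hop0 : pvIsOp c = true := by simpa using hop
        have hnp := pvIsOp_not_paren hop0
        refine ⟨?_, hop0⟩
        simp only [List.take_zero, pvBal, List.count_nil] at hbal
        rw [beq_iff_eq, if_neg hnp.1, if_neg hnp.2]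
        omega
      | succ k =>
        right
        refine (ih _).mpr ⟨k, by simpa using hk, by simpa using hop, ?_⟩
        rw [hshift k] at hbal
        rw [hd']
        omega

-- A's loop returns cat_str exactly when pvHasTop fires, else the 1:-1 slice
theorem stripALoop_eq (cat_str : String) (cs : List Char) (d : Int) :
    stripALoop cat_str cs d =
      if pvHasTop d cs then cat_str else PySem.Str.slice cat_str (some 1) (some (-1)) := by
  induction cs generalizing d with
  | nil => simp [stripALoop, pvHasTop]
  | cons c rest ih =>
    simp only [stripALoop, pvHasTop]
    by_cases h : (if c = '(' then d + 1 else if c = ')' then d - 1 else d) = 0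
        ∧ (c = '/' ∨ c = '\\' ∨ c = '^')
    · have hb : ((if c = '(' then d + 1 else if c = ')' then d - 1 else d) == 0 && pvIsOp c)
          = true := by
        simp only [Bool.and_eq_true, beq_iff_eq, pvIsOp, Bool.or_eq_true]
        exact ⟨h.1, by rcases h.2 with h2 | h2 | h2 <;> simp [h2]⟩
      rw [if_pos h]
      simp only [hb, Bool.true_or, if_pos]
    · have hb : ((if c = '(' then d + 1 else if c = ')' then d - 1 else d) == 0 && pvIsOp c)
          = false := by
        rw [← Bool.not_eq_true]
        intro hc
        simp only [Bool.and_eq_true, beq_iff_eq, pvIsOp, Bool.or_eq_true] at hc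
        exact h ⟨hc.1, by tauto⟩
      rw [if_neg h, ih]
      simp only [hb, Bool.false_or]

-- Python's prefix.count for a single-character pattern is List.count
theorem chars_count_go_singleton (c : Char) (cs : List Char) (fuel acc : Nat)
    (h : cs.length ≤ fuel) :
    PySem.Chars.count.go [c] fuel cs acc = acc + cs.count c := by
  induction cs generalizing fuel acc with
  | nil => cases fuel <;> simp [PySem.Chars.count.go]
  | cons x rest ih =>
    cases fuel with
    | zero => simp at h
    | succ fuel =>
      have hle : rest.length ≤ fuel := by simpa using h
      by_cases hx : c = x
      · subst hx
        simp [PySem.Chars.count.go, List.isPrefixOf, ih fuel (acc + 1) hle]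
        omega
      · have hpre : [c].isPrefixOf (x :: rest) = false := by
          simp [List.isPrefixOf, hx]
        simp [PySem.Chars.count.go, hpre, ih fuel acc hle, List.count_cons]
        simp [Ne.symm hx]

theorem chars_count_singleton (cs : List Char) (c : Char) :
    PySem.Chars.count cs [c] = cs.count c := by
  simp [PySem.Chars.count]
  simpa using chars_count_go_singleton c cs cs.length 0 le_rfl

-- B's prefix-count test at a natural index k means the bracket balance of take k is 0
theorem countEq_iff (cat_str : String) (k : Nat) :
    (PySem.Str.count (PySem.Str.slice cat_str none (some (k : Int))) "("
      = PySem.Str.count (PySem.Str.slice cat_str none (some (k : Int))) ")")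
    ↔ pvBal (cat_str.toList.take k) = 0 := by
  have htl : (PySem.Str.slice cat_str none (some (k : Int))).toList = cat_str.toList.take k := by
    simp [PySem.List.slice_to_natCast]
  have h1 : PySem.Str.count (PySem.Str.slice cat_str none (some (k : Int))) "("
      = (cat_str.toList.take k).count '(' := by
    rw [show PySem.Str.count (PySem.Str.slice cat_str none (some (k : Int))) "("
        = PySem.Chars.count (PySem.Str.slice cat_str none (some (k : Int))).toList "(".toList from by
      simp]
    rw [htl]; exact chars_count_singleton _ _
  have h2 : PySem.Str.count (PySem.Str.slice cat_str none (some (k : Int))) ")"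
      = (cat_str.toList.take k).count ')' := by
    rw [show PySem.Str.count (PySem.Str.slice cat_str none (some (k : Int))) ")"
        = PySem.Chars.count (PySem.Str.slice cat_str none (some (k : Int))).toList ")".toList from by
      simp]
    rw [htl]; exact chars_count_singleton _ _
  rw [h1, h2]
  unfold pvBal
  omega

-- B's loop returns cat_str exactly when some listed index passes the prefix-count test
theorem stripBLoop_eq (cat_str : String) (ops : List Int) :
    stripBLoop cat_str ops =
      if ops.any (fun i => PySem.Str.count (PySem.Str.slice cat_str none (some i)) "("
          == PySem.Str.count (PySem.Str.slice cat_str none (some i)) ")")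
      then cat_str else PySem.Str.slice cat_str (some 1) (some (-1)) := by
  induction ops with
  | nil => simp [stripBLoop]
  | cons i rest ih =>
    simp only [stripBLoop, List.any_cons]
    by_cases h : PySem.Str.count (PySem.Str.slice cat_str none (some i)) "("
        = PySem.Str.count (PySem.Str.slice cat_str none (some i)) ")"
    · have hb : (PySem.Str.count (PySem.Str.slice cat_str none (some i)) "("
          == PySem.Str.count (PySem.Str.slice cat_str none (some i)) ")") = true := by
        rw [beq_iff_eq]; exact h
      rw [if_pos h]
      simp only [hb, Bool.true_or, if_pos]
    · have hb : (PySem.Str.count (PySem.Str.slice cat_str none (some i)) "("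
          == PySem.Str.count (PySem.Str.slice cat_str none (some i)) ")") = false := by
        rw [← Bool.not_eq_true, beq_iff_eq]; exact h
      rw [if_neg h, ih]
      simp only [hb, Bool.false_or]

-- the two Boolean conditions agree on the full string
theorem conditions_agree (cat_str : String) :
    pvHasTop 0 cat_str.toList =
      (((PySem.List.enumerate cat_str.toList 0).filter
          (fun p => p.2 == '/' || p.2 == '\\' || p.2 == '^')).map Prod.fst).any
        (fun i => PySem.Str.count (PySem.Str.slice cat_str none (some i)) "("
          == PySem.Str.count (PySem.Str.slice cat_str none (some i)) ")") := by
  rw [Bool.eq_iff_iff, pvHasTop_iff]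
  rw [List.any_eq_true]
  constructor
  · rintro ⟨k, hk, hop, hbal⟩
    refine ⟨(k : Int), ?_, ?_⟩
    · rw [List.mem_map]
      refine ⟨((k : Int), cat_str.toList[k]), ?_, rfl⟩
      rw [List.mem_filter]
      constructor
      · rw [PySem.List.mem_enumerate_iff]
        exact ⟨k, hk, by simp⟩
      · simpa [pvIsOp] using hop
    · rw [beq_iff_eq]
      exact (countEq_iff cat_str k).mpr (by simpa using hbal)
  · rintro ⟨i, hi, hcnt⟩
    rw [List.mem_map] at hi
    rcases hi with ⟨p, hp, hfst⟩
    rw [List.mem_filter] at hp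
    rcases hp with ⟨hmem, hop⟩
    rw [PySem.List.mem_enumerate_iff] at hmem
    rcases hmem with ⟨k, hk, hpk⟩
    subst hpk
    simp only [zero_add] at hfst hop ⊢
    subst hfst
    rw [beq_iff_eq] at hcnt
    exact ⟨k, hk, by simpa [pvIsOp] using hop, by simpa using (countEq_iff cat_str k).mp hcnt⟩

-- ===== VERDICT (by name: the statement is the Claim_ definition above) =====
theorem strip_brackets_py_spec : Claim_equal_strip_brackets_py := by
  intro cat_str _
  unfold Spec_strip_brackets_py strip_brackets_py strip_brackets_py_alt
  by_cases hg : PySem.Str.startswith cat_str "(" = true ∧ PySem.Str.endswith cat_str ")" = true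
  · rw [if_neg (not_not_intro hg), if_neg (not_not_intro hg)]
    rw [stripALoop_eq, stripBLoop_eq, conditions_agree]
  · rw [if_pos hg, if_pos hg]
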